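/- GENERATED by farm/mkstatement.py from design/units.tsv (unit `DGifGetLine.COMPOSITION`) and the Specs of Gif/Spec/*.lean — do not edit.
   THE STATEMENT of the proof unit `DGifGetLine.COMPOSITION`: the function `DGifGetLine` (81 instructions) satisfies its contract,
   GIVEN THE STATEMENTS OF ITS 5 SEGMENTS (`Gif.Spec.DGifGetLine.Seg<k> Lay μ u₀`: what the unit `DGifGetLine.<k>` proves).
   No machine code is walked: `ReachVia.trans` along the segments (the exit assertion of a segment is the entry assertion of
   its successor), an induction on the loop measures. What the names mean: ProgX/Base/Spec/Basic.lean. The theorem to prove: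
   `theorem DGifGetLine_COMPOSITION_ok : Gif.Spec.DGifGetLine_COMPOSITION.Statement`. -/
import Gif.Code
import Gif.Dec.All
import Gif.Labels
import Gif.Spec.Lzw
import Gif.Spec.Seg_DGifGetLine
namespace Gif.Spec.DGifGetLine_COMPOSITION
open X86 X86.User Asan

/-- The statement of unit `DGifGetLine.COMPOSITION`. -/
def Statement : Prop :=
  ∀ (Lay : Layout) (_hLay : Lay.hi = 0x1000000) (μ : Microarch) (_hμ : UserX.MicroOK μ) (u₀ : State)
    (_h_DGifGetLine_P : Gif.Spec.DGifGetLine.SegP Lay μ u₀)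
    (_h_DGifGetLine_1 : Gif.Spec.DGifGetLine.Seg1 Lay μ u₀)
    (_h_DGifGetLine_2 : Gif.Spec.DGifGetLine.Seg2 Lay μ u₀)
    (_h_DGifGetLine_3 : Gif.Spec.DGifGetLine.Seg3 Lay μ u₀)
    (_h_DGifGetLine_E : Gif.Spec.DGifGetLine.SegE Lay μ u₀),
    ∀ (H : Heap) (rest : List Obj) (frames : List (Nat × FrameLayout)) (F : Forest) (R : Rd) (n : Nat), Calls Lay μ ProgX.Base.WayInv (ProgX.Base.conv u₀) Gif.L.DGifGetLine.entry (Gif.Spec.DGifGetLine.spec H rest frames F R n)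

end Gif.Spec.DGifGetLine_COMPOSITION
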